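-- pv_equiv track=rewrite | github.com/yd-middle-online-4/programmers_kit | jingyu/lv2/220703-메뉴_리뉴얼.py | solution
-- ===== SOURCE A (Python) =====
-- from itertools import combinations
-- from collections import Counter
--
-- def solution(orders, course):
--     answer = []
--
--     for c in course:
--         tmp = []
--         for order in orders:
--             combi = combinations(sorted(order),c)
--             tmp += combi
--
--         dict = Counter(tmp)
--
--         if len(dict) > 0:
--             max_ = max(list(dict.values()))
--
--             if max_ >= 2:
--                 for key_,values_ in dict.items():
--                     if values_ == max_:
--                         answer.append(''.join(map(str,key_)))
--
--     answer = sorted(answer)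
--
--     return answer
-- ===== SOURCE B (Python) =====
-- from itertools import combinations, groupby
--
-- def solution(orders, course):
--     answer = []
--     for c in course:
--         pool = sorted(t for order in orders for t in combinations(sorted(order), c))
--         runs = [(key, sum(1 for _ in grp)) for key, grp in groupby(pool)]
--         best = max((cnt for _, cnt in runs), default=0)
--         if best >= 2:
--             answer += [''.join(key) for key, cnt in runs if cnt == best]
--     return sorted(answer)
-- ===== Notes on version B (the rewrite author's own statement) =====
-- stated objective: alternative
-- what changed: Replaces the Counter hash-count and dict.items scan with a sort-then-groupby frequency pass: all combos of a course size are sorted, adjacent runs give (combo, count) pairs in one sweep, and the max count is taken over those runs (default 0, merging the non-empty and max>=2 gates).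
import Mathlib
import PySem

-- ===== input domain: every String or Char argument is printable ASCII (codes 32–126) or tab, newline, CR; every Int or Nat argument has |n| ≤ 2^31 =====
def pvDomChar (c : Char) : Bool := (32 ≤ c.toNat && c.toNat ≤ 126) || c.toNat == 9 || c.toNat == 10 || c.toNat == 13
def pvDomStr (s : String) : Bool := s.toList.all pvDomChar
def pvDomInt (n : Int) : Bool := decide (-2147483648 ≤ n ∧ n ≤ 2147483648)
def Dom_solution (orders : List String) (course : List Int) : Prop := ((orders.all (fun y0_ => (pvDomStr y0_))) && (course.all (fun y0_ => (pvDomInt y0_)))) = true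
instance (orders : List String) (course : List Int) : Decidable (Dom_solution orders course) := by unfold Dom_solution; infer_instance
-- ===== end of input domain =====

-- B replaces A's Counter hash-count and dict scan by a sort-then-group adjacent-run frequency pass (same results; alternative algorithm, no speed claim).


-- ===== PORT A =====
-- one iteration of A's 'for c in course' loop, transcribed step for step
def bodyA (orders : List String) (answer : List String) (c : Int) : List String :=
  -- tmp = []; for order in orders: tmp += combinations(sorted(order), c)
  let tmp : List (List Char) :=
    orders.foldl (fun tmp order =>
      tmp ++ PySem.List.combinations (PySem.List.sorted order.toList (fun x => x)) c.toNat) []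
  -- dict = Counter(tmp)
  let d : PySem.Dict (List Char) Int := PySem.Dict.counter tmp
  if d.size > 0 then
    -- max_ = max(list(dict.values())): guarded by len(dict) > 0, so the none branch is unreachable
    match PySem.List.max? d.values (fun v => v) with
    | some m =>
        if m ≥ 2 then
          d.items.foldl (fun a kv => if kv.2 == m then a ++ [String.ofList kv.1] else a) answer
        else answer
    | none => answer
  else answer

def solution (orders : List String) (course : List Int) : List String :=
  @PySem.List.sorted String String
    String.instLinearOrder.toLT
    String.instLinearOrder.toDecidableLT
    (course.foldl (bodyA orders) []) (fun x => x) false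

-- ===== PORT B =====
-- itertools.groupby(pool) with the per-group count: adjacent equal runs of pool as (key, length) pairs
def runsGo : List (List Char) → List Char → Int → List (List Char × Int)
  | [], cur, cnt => [(cur, cnt)]
  | y :: ys, cur, cnt => if y == cur then runsGo ys cur (cnt + 1) else (cur, cnt) :: runsGo ys y 1

def runsOf : List (List Char) → List (List Char × Int)
  | [] => []
  | x :: xs => runsGo xs x 1

-- one iteration of B's 'for c in course' loop
def bodyB (orders : List String) (answer : List String) (c : Int) : List String :=
  let pool : List (List Char) :=
    @PySem.List.sorted (List Char) (List Char)
      List.instLinearOrder.toLT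
      List.instLinearOrder.toDecidableLT
      (orders.flatMap (fun order =>
        PySem.List.combinations (PySem.List.sorted order.toList (fun x => x)) c.toNat))
      (fun x => x) false
  let runs := runsOf pool
  let best := PySem.List.maxD (runs.map (fun p => p.2)) (fun v => v) 0
  if best ≥ 2 then
    answer ++ (runs.filter (fun p => p.2 == best)).map (fun p => String.ofList p.1)
  else answer

def solution_alt (orders : List String) (course : List Int) : List String :=
  @PySem.List.sorted String String
    String.instLinearOrder.toLT
    String.instLinearOrder.toDecidableLT
    (course.foldl (bodyB orders) []) (fun x => x) false

-- ===== PRECONDITION & SPEC =====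
-- Pre_ excludes exactly the inputs where Python A raises: a negative course size reaches
-- combinations(sorted(order), c) (ValueError) as soon as there is at least one order.
def Pre_solution (orders : List String) (course : List Int) : Prop :=
  orders = [] ∨ ∀ c ∈ course, 0 ≤ c
instance (orders : List String) (course : List Int) : Decidable (Pre_solution orders course) := by
  unfold Pre_solution; infer_instance
def pvWitness_solution : List String × List Int := (["abc", "ba"], [2])

def Spec_solution (orders : List String) (course : List Int) (out : List String) : Prop := out = solution_alt orders course
instance (orders : List String) (course : List Int) (out : List String) : Decidable (Spec_solution orders course out) := by unfold Spec_solution; infer_instance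

-- ===== CLAIM (what is proved, stated in full; the proofs are below) =====
def Claim_equal_solution : Prop := ∀ (orders : List String) (course : List Int), Dom_solution orders course → Pre_solution orders course → Spec_solution orders course (solution orders course)

-- ===== LEMMAS AND PROOFS =====

lemma runsGo_eq (rest : List (List Char)) : ∀ (cur : List Char) (cnt : Int),
    rest.Pairwise (· ≤ ·) → (∀ y ∈ rest, cur ≤ y) →
    runsGo rest cur cnt
      = (cur, cnt + (List.count cur rest : Int)) :: runsOf (rest.filter (fun y => !(y == cur))) := by
  induction rest with
  | nil => intro cur cnt _ _; simp [runsGo, runsOf]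
  | cons y ys ih =>
    intro cur cnt hp hge
    rcases List.pairwise_cons.mp hp with ⟨hy, hp'⟩
    by_cases h : y = cur
    · subst h
      rw [runsGo, if_pos (by simp), ih y (cnt + 1) hp' hy]
      simp
      ring_nf
    · have hcur_lt : cur < y := lt_of_le_of_ne (hge y (by simp)) (fun e => h e.symm)
      have hnot : cur ∉ y :: ys := by
        intro hm
        rcases List.mem_cons.mp hm with e | hm'
        · exact h e.symm
        · exact absurd (lt_of_lt_of_le hcur_lt (hy cur hm')) (lt_irrefl cur)
      have hcnt : List.count cur (y :: ys) = 0 := List.count_eq_zero.mpr hnot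
      have hfil : (y :: ys).filter (fun z => !(z == cur)) = y :: ys := by
        apply List.filter_eq_self.mpr
        intro z hz
        simp only [Bool.not_eq_eq_eq_not, Bool.not_true, beq_eq_false_iff_ne]
        intro e; subst e; exact hnot hz
      rw [runsGo, if_neg (by simp [h]), hfil, hcnt]
      simp [runsOf]

lemma runsOf_spec : ∀ (n : Nat) (pool : List (List Char)), pool.length ≤ n →
    pool.Pairwise (· ≤ ·) →
    ∃ ks : List (List Char), ks.Nodup ∧ (∀ k, k ∈ ks ↔ k ∈ pool) ∧
      runsOf pool = ks.map (fun k => (k, (List.count k pool : Int))) := by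
  intro n
  induction n with
  | zero =>
    intro pool hlen _
    have : pool = [] := List.length_eq_zero_iff.mp (Nat.le_zero.mp hlen)
    subst this
    exact ⟨[], by simp, by simp, by simp [runsOf]⟩
  | succ n ih =>
    intro pool hlen hp
    cases pool with
    | nil => exact ⟨[], by simp, by simp, by simp [runsOf]⟩
    | cons x xs =>
      rcases List.pairwise_cons.mp hp with ⟨hx, hp'⟩
      have hrw : runsOf (x :: xs)
          = (x, (1 : Int) + (List.count x xs : Int)) :: runsOf (xs.filter (fun y => !(y == x))) := by
        rw [runsOf, runsGo_eq xs x 1 hp' hx]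
      set xs' := xs.filter (fun y => !(y == x)) with hxs'
      have hsub : xs'.Sublist xs := List.filter_sublist
      have hp'' : xs'.Pairwise (· ≤ ·) := hp'.sublist hsub
      have hlen' : xs'.length ≤ n := by
        have := hsub.length_le
        simp only [List.length_cons] at hlen
        omega
      obtain ⟨ks', hnd', hmem', heq'⟩ := ih xs' hlen' hp''
      have hknex : ∀ k ∈ ks', k ≠ x := by
        intro k hk e
        have := (hmem' k).mp hk
        rw [hxs', List.mem_filter] at this
        simp [e] at this
      refine ⟨x :: ks', ?_, ?_, ?_⟩
      · exact List.nodup_cons.mpr ⟨fun hm => hknex x hm rfl, hnd'⟩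
      · intro k
        constructor
        · intro hk
          rcases List.mem_cons.mp hk with e | hk'
          · simp [e]
          · have := (hmem' k).mp hk'
            rw [hxs', List.mem_filter] at this
            exact List.mem_cons.mpr (Or.inr this.1)
        · intro hk
          rcases List.mem_cons.mp hk with e | hk'
          · simp [e]
          · by_cases e : k = x
            · simp [e]
            · refine List.mem_cons.mpr (Or.inr ((hmem' k).mpr ?_))
              rw [hxs', List.mem_filter]
              simp [hk', e]
      · rw [hrw, heq', List.map_cons]
        congr 1
        · have : List.count x (x :: xs) = 1 + List.count x xs := by
            simp; omega
          rw [this]; push_cast; ring_nf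
        · apply List.map_congr_left
          intro k hk
          have hne : k ≠ x := hknex k hk
          have h1 : List.count k xs' = List.count k xs := by
            rw [hxs', List.count_filter]
            simp [hne]
          have h2 : List.count k (x :: xs) = List.count k xs := by
            simp [Ne.symm hne]
          rw [h1, h2]

lemma max?_eq_of_perm {xs ys : List Int} (h : xs.Perm ys) :
    PySem.List.max? xs (fun v => v) = PySem.List.max? ys (fun v => v) := by
  cases hx : PySem.List.max? xs (fun v => v) with
  | none =>
    have : xs = [] := (PySem.List.max?_eq_none_iff xs (fun v => v)).mp hx
    subst this
    rw [(PySem.List.max?_eq_none_iff ys (fun v => v)).mpr (h.nil_eq).symm]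
  | some m =>
    cases hy : PySem.List.max? ys (fun v => v) with
    | none =>
      have : ys = [] := (PySem.List.max?_eq_none_iff ys (fun v => v)).mp hy
      subst this
      have : xs = [] := h.eq_nil
      subst this
      simp [PySem.List.max?] at hx
    | some m' =>
      have hm : m ∈ xs := PySem.List.max?_mem hx
      have hm' : m' ∈ ys := PySem.List.max?_mem hy
      have h1 : m ≤ m' := PySem.List.max?_isMax hy m (h.mem_iff.mp hm)
      have h2 : m' ≤ m := PySem.List.max?_isMax hx m' (h.mem_iff.mpr hm')
      rw [le_antisymm h1 h2]

lemma body_perm (orders : List String) (c : Int) {a b : List String} (h : a.Perm b) :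
    (bodyA orders a c).Perm (bodyB orders b c) := by
  rw [bodyA, bodyB]
  rw [PySem.List.foldl_append_eq_flatMap
    (fun order => PySem.List.combinations (PySem.List.sorted order.toList (fun x => x)) c.toNat)
    orders []]
  rw [List.nil_append]
  generalize (orders.flatMap
    (fun order => PySem.List.combinations (PySem.List.sorted order.toList (fun x => x)) c.toNat)) = tmp
  set pool := @PySem.List.sorted (List Char) (List Char)
      List.instLinearOrder.toLT
      List.instLinearOrder.toDecidableLT
      tmp (fun x => x) false with hpool
  have hpw : pool.Pairwise (· ≤ ·) := by
    rw [hpool]; exact PySem.List.sorted_pairwise tmp (fun x => x)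
  obtain ⟨ks, hnd, hmem, hruns⟩ := runsOf_spec pool.length pool (le_refl _) hpw
  have hpoolperm : pool.Perm tmp := by
    rw [hpool]
    exact @PySem.List.sorted_perm (List Char) (List Char) List.instLinearOrder.toLT
      List.instLinearOrder.toDecidableLT tmp (fun x => x) false
  -- the run list is the counter's items list, up to permutation
  have hitems : (PySem.Dict.counter tmp).items.Perm (runsOf pool) := by
    rw [PySem.Dict.items_counter, hruns]
    have hcnt : (ks.map fun k => (k, (List.count k pool : Int)))
        = ks.map fun k => (k, (List.count k tmp : Int)) := by
      apply List.map_congr_left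
      intro k _
      rw [hpoolperm.count_eq k]
    rw [hcnt]
    apply List.Perm.map
    rw [List.perm_ext_iff_of_nodup (PySem.Set.nodup_ofList tmp) hnd]
    intro k
    rw [PySem.Set.mem_ofList, hmem, hpool,
      @PySem.List.mem_sorted (List Char) (List Char) List.instLinearOrder.toLT
        List.instLinearOrder.toDecidableLT tmp (fun x => x) false k]
  by_cases htmpnil : tmp = []
  · subst htmpnil
    have hpoolnil : pool = [] := by rw [hpool]; rfl
    rw [hpoolnil]
    simp only [PySem.Dict.counter, PySem.Dict.size]
    norm_num [PySem.Dict.empty, PySem.Dict.items, runsOf, PySem.List.maxD, PySem.List.max?]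
    exact h
  · have hvalsperm : (PySem.Dict.counter tmp).values.Perm ((runsOf pool).map (fun p => p.2)) := by
      simpa [PySem.Dict.values] using hitems.map (fun p => p.2)
    have hitemsne : (PySem.Dict.counter tmp).items ≠ [] := by
      intro hnil
      rcases List.exists_mem_of_ne_nil tmp htmpnil with ⟨t, ht⟩
      have : t ∈ PySem.Set.ofList tmp := (PySem.Set.mem_ofList tmp t).mpr ht
      rw [PySem.Dict.items_counter] at hnil
      rcases List.map_eq_nil_iff.mp hnil with e
      rw [e] at this
      exact absurd this (List.not_mem_nil)
    have hsz : (PySem.Dict.counter tmp).size > 0 := by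
      simp only [PySem.Dict.size]
      exact List.length_pos_iff.mpr hitemsne
    have hvalsne : (PySem.Dict.counter tmp).values ≠ [] := by
      simp only [PySem.Dict.values]
      exact fun e => hitemsne (List.map_eq_nil_iff.mp e)
    obtain ⟨m, hmax⟩ : ∃ m, PySem.List.max? (PySem.Dict.counter tmp).values (fun v => v) = some m := by
      cases hv : PySem.List.max? (PySem.Dict.counter tmp).values (fun v => v) with
      | none => exact absurd ((PySem.List.max?_eq_none_iff _ _).mp hv) hvalsne
      | some m => exact ⟨m, rfl⟩
    · have hmaxB : PySem.List.max? ((runsOf pool).map (fun p => p.2)) (fun v => v) = some m := by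
        rw [← max?_eq_of_perm hvalsperm, hmax]
      have hbest : PySem.List.maxD ((runsOf pool).map (fun p => p.2)) (fun v => v) 0 = m := by
        rw [PySem.List.maxD, hmaxB]; rfl
      rw [if_pos hsz, hmax, hbest]
      dsimp only
      by_cases hm2 : m ≥ 2
      · rw [if_pos hm2, if_pos hm2]
        rw [PySem.List.foldl_append_if (fun kv => kv.2 == m) (fun kv => String.ofList kv.1)
          (PySem.Dict.counter tmp).items a]
        exact h.append ((hitems.filter _).map _)
      · rw [if_neg hm2, if_neg hm2]
        exact h

lemma foldl_body_perm (orders : List String) : ∀ (course : List Int) (a b : List String),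
    a.Perm b → (course.foldl (bodyA orders) a).Perm (course.foldl (bodyB orders) b) := by
  intro course
  induction course with
  | nil => intro a b h; simpa using h
  | cons c cs ih =>
    intro a b h
    simp only [List.foldl_cons]
    exact ih _ _ (body_perm orders c h)

-- ===== VERDICT (by name: the statement is the Claim_ definition above) =====
theorem solution_spec : Claim_equal_solution := by
  intro orders course _ _
  unfold Spec_solution solution solution_alt
  exact PySem.List.sorted_eq_sorted_of_perm _ _ (fun x => x) (fun _ _ e => e)
    (foldl_body_perm orders course [] [] (List.Perm.refl []))
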